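-- pv_equiv track=rewrite | github.com/zjn-astonishe/droidrun | droidrun/skill/skill_extractor.py | _count_sequential_pattern
-- ===== SOURCE A (Python) =====
-- from typing import Any, Dict, List, Optional, Set
--
-- def _count_sequential_pattern(action_types: List[str], pattern: str) -> int:
--     """Count maximum consecutive occurrences of a pattern."""
--     max_count = 0
--     current_count = 0
--
--     for action_type in action_types:
--         if action_type == pattern:
--             current_count += 1
--             max_count = max(max_count, current_count)
--         else:
--             current_count = 0
--
--     return max_count
-- ===== SOURCE B (Python) =====
-- from itertools import groupby
-- from typing import List
--
-- def _count_sequential_pattern(action_types: List[str], pattern: str) -> int: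
--     """Count maximum consecutive occurrences of a pattern (groupby decomposition)."""
--     return max((sum(1 for _ in group) for key, group in groupby(action_types) if key == pattern), default=0)
-- ===== Notes on version B (the rewrite author's own statement) =====
-- stated objective: idiomatic
-- what changed: Replaces the manual running-counter/reset loop with an itertools.groupby split into maximal runs followed by max over the lengths of runs matching the pattern (default=0).
import Mathlib
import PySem

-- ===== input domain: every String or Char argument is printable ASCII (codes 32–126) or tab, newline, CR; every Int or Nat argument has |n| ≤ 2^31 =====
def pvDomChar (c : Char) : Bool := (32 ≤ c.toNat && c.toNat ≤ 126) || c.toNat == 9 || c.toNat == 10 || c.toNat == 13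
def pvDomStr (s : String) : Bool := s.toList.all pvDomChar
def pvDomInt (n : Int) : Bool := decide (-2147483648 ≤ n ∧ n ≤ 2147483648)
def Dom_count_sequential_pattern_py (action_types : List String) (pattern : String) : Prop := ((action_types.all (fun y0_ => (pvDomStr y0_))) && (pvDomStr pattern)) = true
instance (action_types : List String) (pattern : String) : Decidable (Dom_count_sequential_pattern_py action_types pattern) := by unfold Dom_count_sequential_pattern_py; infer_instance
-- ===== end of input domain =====

-- B replaces A's running-counter/reset loop by a groupby-into-maximal-runs then max-of-matching-run-lengths decomposition (idiomatic; same cost).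


-- ===== PORT A =====
-- the for-loop over action_types with state (max_count, current_count), branches in source order
def pvALoop (pattern : String) : List String → Int → Int → Int
  | [], max_count, _current_count => max_count
  | action_type :: rest, max_count, current_count =>
    if action_type = pattern then
      pvALoop pattern rest (max max_count (current_count + 1)) (current_count + 1)
    else
      pvALoop pattern rest max_count 0

def count_sequential_pattern_py (action_types : List String) (pattern : String) : Int :=
  pvALoop pattern action_types 0 0

-- ===== PORT B =====
-- itertools.groupby(action_types): the list of maximal runs as (key, length) pairs
def pvRunLengths : List String → List (String × Int)
  | [] => []
  | x :: xs =>
    match pvRunLengths xs with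
    | [] => [(x, 1)]
    | (y, n) :: rest => if x = y then (y, n + 1) :: rest else (x, 1) :: (y, n) :: rest

-- max(values, default=0); exact here since every run length is ≥ 1
def pvMaxDefault0 (l : List Int) : Int := l.foldl max 0

def count_sequential_pattern_py_alt (action_types : List String) (pattern : String) : Int :=
  pvMaxDefault0 (((pvRunLengths action_types).filter (fun q => q.1 == pattern)).map Prod.snd)

-- ===== PRECONDITION & SPEC =====
def Spec_count_sequential_pattern_py (action_types : List String) (pattern : String) (out : Int) : Prop := out = count_sequential_pattern_py_alt action_types pattern
instance (action_types : List String) (pattern : String) (out : Int) : Decidable (Spec_count_sequential_pattern_py action_types pattern out) := by unfold Spec_count_sequential_pattern_py; infer_instance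

-- ===== CLAIM (what is proved, stated in full; the proofs are below) =====
def Claim_equal_count_sequential_pattern_py : Prop := ∀ (action_types : List String) (pattern : String), Dom_count_sequential_pattern_py action_types pattern → Spec_count_sequential_pattern_py action_types pattern (count_sequential_pattern_py action_types pattern)

-- ===== LEMMAS AND PROOFS =====

-- B's maximum over a run list
def pvBM (pattern : String) (rl : List (String × Int)) : Int :=
  pvMaxDefault0 ((rl.filter (fun q => q.1 == pattern)).map Prod.snd)

-- A's remaining loop value relative to a pending streak c, phrased on the run list
def pvG (pattern : String) (l : List String) (c : Int) : Int :=
  match pvRunLengths l with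
  | [] => 0
  | (k, n) :: rest => if k = pattern then max (c + n) (pvBM pattern rest) else pvBM pattern (pvRunLengths l)

theorem pvRL_cons_nil (x : String) (xs : List String) (h : pvRunLengths xs = []) :
    pvRunLengths (x :: xs) = [(x, 1)] := by simp [pvRunLengths, h]

theorem pvRL_cons_cons (x y : String) (n : Int) (r : List (String × Int)) (xs : List String)
    (h : pvRunLengths xs = (y, n) :: r) :
    pvRunLengths (x :: xs) = if x = y then (y, n + 1) :: r else (x, 1) :: (y, n) :: r := by
  simp [pvRunLengths, h]

theorem pvG_eq_nil (pattern : String) (l : List String) (c : Int) (h : pvRunLengths l = []) :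
    pvG pattern l c = 0 := by simp [pvG, h]

theorem pvG_eq_cons (pattern k : String) (n : Int) (rest : List (String × Int)) (l : List String) (c : Int)
    (h : pvRunLengths l = (k, n) :: rest) :
    pvG pattern l c = if k = pattern then max (c + n) (pvBM pattern rest) else pvBM pattern ((k, n) :: rest) := by
  simp [pvG, h]

theorem pvRunLengths_pos : ∀ (l : List String), ∀ q ∈ pvRunLengths l, (1 : Int) ≤ q.2 := by
  intro l
  induction l with
  | nil => intro q hq; simp [pvRunLengths] at hq
  | cons x xs ih =>
    intro q hq
    rcases h : pvRunLengths xs with _ | ⟨⟨y, n⟩, rest⟩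
    · rw [pvRL_cons_nil x xs h] at hq
      simp at hq; subst hq; norm_num
    · rw [pvRL_cons_cons x y n rest xs h] at hq
      by_cases hxy : x = y
      · rw [if_pos hxy] at hq
        rcases List.mem_cons.mp hq with hq | hq
        · have h1 : (1 : Int) ≤ n := by
            simpa using ih (y, n) (by rw [h]; exact List.mem_cons_self)
          subst hq; simp; omega
        · exact ih q (by rw [h]; exact List.mem_cons_of_mem _ hq)
      · rw [if_neg hxy] at hq
        rcases List.mem_cons.mp hq with hq | hq
        · subst hq; norm_num
        · exact ih q (by rw [h]; exact hq)

theorem pvFoldl_max_shuffle : ∀ (l : List Int) (a b : Int), l.foldl max (max a b) = max a (l.foldl max b) := by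
  intro l
  induction l with
  | nil => intro a b; simp [List.foldl]
  | cons x xs ih =>
    intro a b
    simp only [List.foldl]
    rw [max_assoc, ih]

theorem pvBM_nonneg (pattern : String) (rl : List (String × Int)) : 0 ≤ pvBM pattern rl := by
  have h := pvFoldl_max_shuffle ((rl.filter (fun q => q.1 == pattern)).map Prod.snd) 0 0
  simp only [max_self] at h
  simp only [pvBM, pvMaxDefault0]
  omega

theorem pvBM_nil (pattern : String) : pvBM pattern [] = 0 := rfl

theorem pvBM_cons (pattern k : String) (n : Int) (r : List (String × Int)) (hn : 1 ≤ n) :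
    pvBM pattern ((k, n) :: r) = if k = pattern then max n (pvBM pattern r) else pvBM pattern r := by
  by_cases hk : k = pattern
  · rw [if_pos hk]
    simp only [pvBM, pvMaxDefault0, List.filter_cons]
    simp only [hk, beq_self_eq_true, if_true, List.map_cons, List.foldl_cons]
    rw [show (max (0 : Int) n) = max n 0 from max_comm 0 n, pvFoldl_max_shuffle]
  · rw [if_neg hk]
    simp only [pvBM, pvMaxDefault0, List.filter_cons]
    have : (k == pattern) = false := by simpa using hk
    simp [this]

theorem pvMain (pattern : String) : ∀ (l : List String) (m c : Int), 0 ≤ m →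
    pvALoop pattern l m c = max m (pvG pattern l c) := by
  intro l
  induction l with
  | nil =>
    intro m c hm
    simp only [pvALoop, pvG, pvRunLengths]
    omega
  | cons a rest ih =>
    intro m c hm
    simp only [pvALoop]
    by_cases ha : a = pattern
    · rw [if_pos ha, ih (max m (c + 1)) (c + 1) (by omega)]
      rcases h : pvRunLengths rest with _ | ⟨⟨y, n⟩, rl⟩
      · rw [pvG_eq_nil pattern rest (c + 1) h,
          pvG_eq_cons pattern a 1 [] (a :: rest) c (pvRL_cons_nil a rest h),
          if_pos ha, pvBM_nil]
        omega
      · have hn : (1 : Int) ≤ n := by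
          simpa using pvRunLengths_pos rest (y, n) (by rw [h]; exact List.mem_cons_self)
        rw [pvG_eq_cons pattern y n rl rest (c + 1) h]
        by_cases hay : a = y
        · have hy : y = pattern := hay ▸ ha
          have hRL : pvRunLengths (a :: rest) = (y, n + 1) :: rl := by
            rw [pvRL_cons_cons a y n rl rest h, if_pos hay]
          rw [pvG_eq_cons pattern y (n + 1) rl (a :: rest) c hRL, if_pos hy, if_pos hy]
          omega
        · have hy : ¬ y = pattern := fun hh => hay (by rw [ha, hh])
          have hRL : pvRunLengths (a :: rest) = (a, 1) :: (y, n) :: rl := by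
            rw [pvRL_cons_cons a y n rl rest h, if_neg hay]
          rw [pvG_eq_cons pattern a 1 ((y, n) :: rl) (a :: rest) c hRL, if_pos ha, if_neg hy]
          omega
    · rw [if_neg ha, ih m 0 hm]
      rcases h : pvRunLengths rest with _ | ⟨⟨y, n⟩, rl⟩
      · rw [pvG_eq_nil pattern rest 0 h,
          pvG_eq_cons pattern a 1 [] (a :: rest) c (pvRL_cons_nil a rest h),
          if_neg ha, pvBM_cons pattern a 1 [] (by norm_num : (1:Int) ≤ 1), if_neg ha, pvBM_nil]
      · have hn : (1 : Int) ≤ n := by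
          simpa using pvRunLengths_pos rest (y, n) (by rw [h]; exact List.mem_cons_self)
        rw [pvG_eq_cons pattern y n rl rest 0 h]
        by_cases hay : a = y
        · have hy : ¬ y = pattern := fun hh => ha (by rw [hay, hh])
          have hRL : pvRunLengths (a :: rest) = (y, n + 1) :: rl := by
            rw [pvRL_cons_cons a y n rl rest h, if_pos hay]
          rw [pvG_eq_cons pattern y (n + 1) rl (a :: rest) c hRL, if_neg hy, if_neg hy,
            pvBM_cons pattern y (n + 1) rl (by omega), if_neg hy,
            pvBM_cons pattern y n rl hn, if_neg hy]
        · have hRL : pvRunLengths (a :: rest) = (a, 1) :: (y, n) :: rl := by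
            rw [pvRL_cons_cons a y n rl rest h, if_neg hay]
          rw [pvG_eq_cons pattern a 1 ((y, n) :: rl) (a :: rest) c hRL, if_neg ha,
            pvBM_cons pattern a 1 ((y, n) :: rl) (by omega), if_neg ha]
          by_cases hy : y = pattern
          · rw [if_pos hy, pvBM_cons pattern y n rl hn, if_pos hy]
            omega
          · rw [if_neg hy]

-- ===== VERDICT (by name: the statement is the Claim_ definition above) =====
theorem count_sequential_pattern_py_spec : Claim_equal_count_sequential_pattern_py := by
  intro l pattern _
  unfold Spec_count_sequential_pattern_py count_sequential_pattern_py count_sequential_pattern_py_alt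
  rw [pvMain pattern l 0 0 le_rfl]
  show max 0 (pvG pattern l 0) = pvBM pattern (pvRunLengths l)
  rcases h : pvRunLengths l with _ | ⟨⟨y, n⟩, rl⟩
  · rw [pvG_eq_nil pattern l 0 h, pvBM_nil]; omega
  · have hn : (1 : Int) ≤ n := by
      simpa using pvRunLengths_pos l (y, n) (by rw [h]; exact List.mem_cons_self)
    rw [pvG_eq_cons pattern y n rl l 0 h, pvBM_cons pattern y n rl hn]
    by_cases hy : y = pattern
    · rw [if_pos hy, if_pos hy]
      have := pvBM_nonneg pattern rl
      omega
    · rw [if_neg hy, if_neg hy]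
      have := pvBM_nonneg pattern ((y, n) :: rl)
      rw [pvBM_cons pattern y n rl hn, if_neg hy] at this
      omega
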